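-- pv_equiv track=rewrite | github.com/aarond0623/advent-code-2024 | 09/part1.py | map_disk
-- ===== SOURCE A (Python) =====
-- def map_disk(sequence: list[int]) -> list[tuple[int, int]]:
--     """Takes as input a list of integers representing the disk map. Disk maps
--     are represented by digits that alternately represent the size of a file and
--     the size of free space on the drive. For example, in the following disk
--     map, files are represented by index and space is represented by .
--
--     Disk map: [1, 2, 3, 4, 5]
--     Files:    0..111....22222
--
--     The function returns a list of tuples representing slices for files. In the
--     example above, the function would return:
--
--     [(0, 1), (3, 6), (10, 15)]
--     """
--     index = 0
--     slices = []
--     for (i, digit) in enumerate(sequence):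
--         if i % 2 == 0:  # This is a file
--             slices.append((index, index+digit))
--         index += digit
--     return slices
-- ===== SOURCE B (Python) =====
-- def map_disk(sequence: list[int]) -> list[tuple[int, int]]:
--     """Staged table-then-select decomposition: first build the full table of
--     running boundary offsets (a prefix-sum list of length len(sequence)+1),
--     then form the file slices by pairing the even-indexed boundaries with the
--     odd-indexed ones.  No per-item parity test, no interval construction
--     inside the accumulation loop."""
--     offsets = [0]
--     for d in sequence:
--         offsets.append(offsets[-1] + d)
--     return list(zip(offsets[::2], offsets[1::2]))
-- ===== Notes on version B (the rewrite author's own statement) =====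
-- stated objective: alternative
-- what changed: B is a staged table-then-select decomposition: it first builds the complete prefix-sum table of running boundary offsets, then forms the file slices in a second pass by zipping the even-indexed offsets with the odd-indexed ones, instead of A's single enumerate loop with a per-item i%2 parity branch that builds intervals while accumulating.
import Mathlib
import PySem

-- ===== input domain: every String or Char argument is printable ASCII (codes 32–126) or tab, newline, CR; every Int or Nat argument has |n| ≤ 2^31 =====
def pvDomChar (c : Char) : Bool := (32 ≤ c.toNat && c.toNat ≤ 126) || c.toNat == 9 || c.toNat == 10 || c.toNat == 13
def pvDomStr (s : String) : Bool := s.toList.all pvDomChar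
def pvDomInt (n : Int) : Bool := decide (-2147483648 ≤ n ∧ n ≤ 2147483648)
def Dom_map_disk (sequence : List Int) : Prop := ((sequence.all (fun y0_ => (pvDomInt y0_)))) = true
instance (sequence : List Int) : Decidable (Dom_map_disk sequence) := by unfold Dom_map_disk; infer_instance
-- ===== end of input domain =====

-- B replaces A's single enumerate loop with a parity branch by a staged decomposition:
-- build the prefix-sum table of boundary offsets first, then zip even- and odd-indexed
-- offsets into slices (objective: alternative).

-- ===== PORT A =====
def map_disk (sequence : List Int) : List (Int × Int) :=
  ((PySem.List.enumerate sequence 0).foldl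
    (fun (st : Int × List (Int × Int)) (p : Int × Int) =>
      let slices := if p.1 % 2 == 0 then st.2 ++ [(st.1, st.1 + p.2)] else st.2
      (st.1 + p.2, slices))
    ((0 : Int), ([] : List (Int × Int)))).2

-- ===== PORT B =====
-- hand port of the step-2 slices offsets[::2] / offsets[1::2] (whole-list slice with
-- step 2 = every other element starting at the head): exact on all lists
def everyOther : List Int → List Int
  | [] => []
  | [a] => [a]
  | a :: _ :: t => a :: everyOther t

def map_disk_alt (sequence : List Int) : List (Int × Int) :=
  let offsets := sequence.foldl (fun acc d => acc ++ [acc.getLast! + d]) [(0 : Int)]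
  (everyOther offsets).zip (everyOther (offsets.drop 1))

-- ===== PRECONDITION & SPEC =====
def Spec_map_disk (sequence : List Int) (out : List (Int × Int)) : Prop := out = map_disk_alt sequence
instance (sequence : List Int) (out : List (Int × Int)) : Decidable (Spec_map_disk sequence out) := by unfold Spec_map_disk; infer_instance

-- ===== CLAIM (what is proved, stated in full; the proofs are below) =====
def Claim_equal_map_disk : Prop := ∀ (sequence : List Int), Dom_map_disk sequence → Spec_map_disk sequence (map_disk sequence)

-- ===== LEMMAS AND PROOFS =====

-- reference form of A's loop result: one interval per (file, gap) pair
def mapDiskGo (start : Int) : List Int → List (Int × Int)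
  | [] => []
  | [a] => [(start, start + a)]
  | a :: b :: t => (start, start + a) :: mapDiskGo (start + a + b) t

-- reference form of B's offsets table: prefix sums starting at idx
def scanAdd (idx : Int) : List Int → List Int
  | [] => [idx]
  | d :: t => idx :: scanAdd (idx + d) t

theorem foldl_eq_mapDiskGo (t : List Int) (idx : Int) (acc : List (Int × Int)) (e : Int)
    (he : e % 2 = 0) :
    ((PySem.List.enumerate t e).foldl
      (fun (st : Int × List (Int × Int)) (p : Int × Int) =>
        let slices := if p.1 % 2 == 0 then st.2 ++ [(st.1, st.1 + p.2)] else st.2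
        (st.1 + p.2, slices)) (idx, acc))
      = (idx + t.sum, acc ++ mapDiskGo idx t) := by
  match t with
  | [] => simp [PySem.List.enumerate_nil, mapDiskGo]
  | [a] =>
      have hd : (2 : Int) ∣ e := by omega
      simp [PySem.List.enumerate_cons, PySem.List.enumerate_nil, mapDiskGo, hd]
  | a :: b :: t' =>
      have hb0 : (e % 2 == 0) = true := by simp [he]
      have hb1 : ((e + 1) % 2 == 0) = false := by
        have : (e + 1) % 2 = 1 := by omega
        simp [this]
      simp only [PySem.List.enumerate_cons, List.foldl_cons, hb0, hb1, Bool.false_eq_true,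
        if_true, if_false]
      rw [foldl_eq_mapDiskGo t' (idx + a + b) (acc ++ [(idx, idx + a)]) (e + 1 + 1) (by omega)]
      simp [mapDiskGo, List.sum_cons]
      ring

theorem foldl_offsets_eq_scanAdd (t : List Int) (acc : List Int) (idx : Int) :
    (t.foldl (fun acc d => acc ++ [acc.getLast! + d]) (acc ++ [idx]))
      = acc ++ scanAdd idx t := by
  match t with
  | [] => simp [scanAdd]
  | d :: t' =>
      have hl : (acc ++ [idx]).getLast! = idx := by
        cases acc with
        | nil => rfl
        | cons x xs => simp [List.getLast!]
      rw [List.foldl_cons, hl]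
      have : acc ++ [idx] ++ [idx + d] = (acc ++ [idx]) ++ [idx + d] := by simp
      rw [this, foldl_offsets_eq_scanAdd t' (acc ++ [idx]) (idx + d)]
      simp [scanAdd]

theorem mapDiskGo_eq_zip (t : List Int) (idx : Int) :
    mapDiskGo idx t
      = (everyOther (scanAdd idx t)).zip (everyOther ((scanAdd idx t).drop 1)) := by
  match t with
  | [] => simp [mapDiskGo, scanAdd, everyOther]
  | [a] => simp [mapDiskGo, scanAdd, everyOther]
  | a :: b :: t' =>
      match t' with
      | [] => simp [mapDiskGo, scanAdd, everyOther]
      | c :: t'' =>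
          simp only [mapDiskGo, scanAdd, everyOther, List.drop_succ_cons, List.drop_zero,
            List.zip_cons_cons]
          rw [mapDiskGo_eq_zip (c :: t'') (idx + a + b)]
          simp [scanAdd]

-- ===== VERDICT (by name: the statement is the Claim_ definition above) =====
theorem map_disk_spec : Claim_equal_map_disk := by
  intro sequence _
  show map_disk sequence = map_disk_alt sequence
  unfold map_disk map_disk_alt
  rw [foldl_eq_mapDiskGo sequence 0 [] 0 rfl]
  have h0 : ([(0 : Int)] : List Int) = ([] : List Int) ++ [(0 : Int)] := rfl
  rw [h0, foldl_offsets_eq_scanAdd sequence [] 0]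
  simp [mapDiskGo_eq_zip]
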